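-- pv_equiv track=rewrite | github.com/seungh0/programmers-algorithm | 202105/20210517/one.py | solution
-- ===== SOURCE A (Python) =====
-- import heapq
--
-- def solution(param):
--     q = []
--     for i in range(len(param)):
--         for j in range(len(param[i])):
--             heapq.heappush(q, param[i][j])
--     result = []
--     while q:
--         result.append(heapq.heappop(q))
--     return result
-- ===== SOURCE B (Python) =====
-- def solution(param):
--     return sorted([x for row in param for x in row])
-- ===== Notes on version B (the rewrite author's own statement) =====
-- stated objective: simpler
-- what changed: Replaced the heapq priority queue with its element-by-element push loop and while-pop loop by a one-line flatten comprehension followed by the built-in sort.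
import Mathlib
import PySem

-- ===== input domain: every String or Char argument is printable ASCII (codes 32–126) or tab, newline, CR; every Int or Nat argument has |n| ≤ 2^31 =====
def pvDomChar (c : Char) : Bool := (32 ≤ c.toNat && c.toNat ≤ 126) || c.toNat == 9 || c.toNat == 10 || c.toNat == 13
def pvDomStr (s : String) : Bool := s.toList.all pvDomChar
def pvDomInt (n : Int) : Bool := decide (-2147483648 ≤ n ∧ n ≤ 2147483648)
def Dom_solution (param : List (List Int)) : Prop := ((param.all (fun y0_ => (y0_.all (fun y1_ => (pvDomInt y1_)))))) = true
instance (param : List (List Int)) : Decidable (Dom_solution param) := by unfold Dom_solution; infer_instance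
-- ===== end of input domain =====

-- B replaces A's heapq priority queue (push loop + while-pop loop) by a flatten comprehension
-- followed by the built-in sort; same return value, simpler code.

-- ===== PORT A =====
-- A uses Python's heapq; heapq is not in PySem, so the binary-heap array algorithm of
-- heappush/heappop is ported by hand, step for step, on the backing list (exact: the
-- resulting array after each operation is the array CPython's heapq produces).  Each
-- while-loop carries a structural fuel that provably never runs out (a totality guard
-- only: fuel = start index for the bubble-up, = array length for the sift-down and the
-- pop loop).

-- h[i] (indices are always in range where these helpers are used)
def hGet (h : List Int) (i : Nat) : Int := h.getD i 0

-- h[i], h[j] = h[j], h[i]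
def hSwap (h : List Int) (i j : Nat) : List Int := (h.set i (hGet h j)).set j (hGet h i)

-- loop of heapq._siftdown(h, 0, pos): bubble the element at pos up while it is below its
-- parent; the position strictly decreases, so the start index bounds the iteration count
def siftUpF : Nat → List Int → Nat → List Int
  | 0, h, _ => h
  | fuel + 1, h, pos =>
    if pos = 0 then h
    else
      let parent := (pos - 1) / 2
      if hGet h pos < hGet h parent then siftUpF fuel (hSwap h pos parent) parent
      else h

def siftUp (h : List Int) (pos : Nat) : List Int := siftUpF pos h pos

-- loop of heapq._siftup(h, pos): move the element at pos down along the smaller-child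
-- chain (CPython sinks it to a leaf and bubbles back; the resulting array is the same);
-- the position strictly increases below the length, so the length bounds the iterations
def siftDownF : Nat → List Int → Nat → List Int
  | 0, h, _ => h
  | fuel + 1, h, pos =>
    let l := 2 * pos + 1
    let r := 2 * pos + 2
    if l < h.length then
      let c := if r < h.length && hGet h r < hGet h l then r else l
      if hGet h c < hGet h pos then siftDownF fuel (hSwap h pos c) c else h
    else h

def siftDown (h : List Int) (pos : Nat) : List Int := siftDownF h.length h pos

-- heapq.heappush(h, x)
def heappush (h : List Int) (x : Int) : List Int := siftUp (h ++ [x]) h.length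

-- heapq.heappop(h) for nonempty h (A only pops while the queue is nonempty)
def heappop (h : List Int) : Int × List Int :=
  let lastelt := h.getLast?.getD 0
  let rest := h.dropLast
  if rest.isEmpty then (lastelt, [])
  else (hGet rest 0, siftDown (rest.set 0 lastelt) 0)

-- the while-pop loop of A; each pop removes one element, so the length bounds the loop
def popAllF : Nat → List Int → List Int
  | 0, _ => []
  | fuel + 1, h =>
    if h.isEmpty then []
    else
      let p := heappop h
      p.1 :: popAllF fuel p.2

def popAll (h : List Int) : List Int := popAllF h.length h

def solution (param : List (List Int)) : List Int :=
  popAll (param.foldl (fun q row => row.foldl (fun q x => heappush q x) q) [])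

-- ===== PORT B =====
def solution_alt (param : List (List Int)) : List Int :=
  PySem.List.sorted (param.flatMap (fun row => row)) (fun x => x) false

-- ===== PRECONDITION & SPEC =====
def Spec_solution (param : List (List Int)) (out : List Int) : Prop := out = solution_alt param
instance (param : List (List Int)) (out : List Int) : Decidable (Spec_solution param out) := by unfold Spec_solution; infer_instance

-- ===== CLAIM (what is proved, stated in full; the proofs are below) =====
def Claim_equal_solution : Prop := ∀ (param : List (List Int)), Dom_solution param → Spec_solution param (solution param)

-- ===== LEMMAS AND PROOFS =====

theorem hSwap_length (h : List Int) (i j : Nat) : (hSwap h i j).length = h.length := by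
  simp [hSwap]

theorem hGet_eq_getElem (h : List Int) (i : Nat) (hi : i < h.length) : hGet h i = h[i] := by
  simp [hGet, List.getElem?_eq_getElem hi]

theorem hGet_set_self (h : List Int) (i : Nat) (v : Int) (hi : i < h.length) :
    hGet (h.set i v) i = v := by
  simp [hGet, List.getD, hi]

theorem hGet_set_ne (h : List Int) (i j : Nat) (v : Int) (hij : i ≠ j) :
    hGet (h.set i v) j = hGet h j := by
  simp [hGet, List.getD, List.getElem?_set_ne hij]

theorem hGet_swap_fst (h : List Int) (i j : Nat) (hi : i < h.length) :
    hGet (hSwap h i j) i = hGet h j := by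
  by_cases hij : i = j
  · subst hij; simp [hSwap, List.set_set, hGet_set_self _ _ _ hi]
  · rw [hSwap, hGet_set_ne _ _ _ _ (Ne.symm hij), hGet_set_self _ _ _ hi]

theorem hGet_swap_snd (h : List Int) (i j : Nat) (hj : j < h.length) :
    hGet (hSwap h i j) j = hGet h i := by
  rw [hSwap, hGet_set_self _ _ _ (by simpa)]

theorem hGet_swap_other (h : List Int) (i j k : Nat) (hki : k ≠ i) (hkj : k ≠ j) :
    hGet (hSwap h i j) k = hGet h k := by
  rw [hSwap, hGet_set_ne _ _ _ _ (Ne.symm hkj), hGet_set_ne _ _ _ _ (Ne.symm hki)]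

theorem siftDownF_length (fuel : Nat) : ∀ (h : List Int) (pos : Nat),
    (siftDownF fuel h pos).length = h.length := by
  induction fuel with
  | zero => intro h pos; rfl
  | succ fuel ih =>
    intro h pos
    rw [siftDownF]
    dsimp only
    split
    · split <;> split
      · rw [ih, hSwap_length]
      · rfl
      · rw [ih, hSwap_length]
      · rfl
    · rfl

theorem siftDown_length (h : List Int) (pos : Nat) : (siftDown h pos).length = h.length :=
  siftDownF_length h.length h pos

theorem heappop_length (h : List Int) (hne : h ≠ []) :
    (heappop h).2.length = h.length - 1 := by
  have hlen : h.length ≠ 0 := by simpa [List.length_eq_zero_iff] using hne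
  unfold heappop
  by_cases hd : h.dropLast.isEmpty
  · have h0 : h.dropLast = [] := by simpa [List.isEmpty_iff] using hd
    have h1 : h.length - 1 = 0 := by
      have h2 := congrArg List.length h0
      simpa [List.length_dropLast] using h2
    simp [hd, h1]
  · simp [hd, siftDown_length, List.length_dropLast]

-- pulling the m-th element to the front is a permutation
theorem pull_perm (t : List Int) (v : Int) (m : Nat) (hm : m < t.length) :
    (hGet t m :: t.set m v).Perm (v :: t) := by
  induction t generalizing m with
  | nil => simp at hm
  | cons a t ih =>
    cases m with
    | zero => simpa [hGet, List.getD] using List.Perm.swap v a t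
    | succ m =>
      have hm' : m < t.length := by simpa using hm
      have h1 : (hGet (a :: t) (m + 1) :: (a :: t).set (m + 1) v)
          = hGet t m :: a :: t.set m v := by simp [hGet, List.getD]
      rw [h1]
      refine ((List.Perm.swap a (hGet t m) (t.set m v)).trans ?_)
      exact ((ih m hm').cons a).trans (List.Perm.swap v a t)

theorem hSwap_perm (h : List Int) (i j : Nat) (hi : i < h.length) (hj : j < h.length) :
    (hSwap h i j).Perm h := by
  induction h generalizing i j with
  | nil => simp at hi
  | cons a t ih =>
    by_cases hij : i = j
    · subst hij
      have e1 : hSwap (a :: t) i i = (a :: t).set i (hGet (a :: t) i) := by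
        simp [hSwap, List.set_set]
      have e2 : (a :: t).set i (hGet (a :: t) i) = a :: t := by
        apply List.ext_getElem (by simp)
        intro k hk1 hk2
        by_cases hki : k = i
        · subst hki
          rw [List.getElem_set_self, hGet_eq_getElem _ _ hk2]
        · rw [List.getElem_set_ne (by omega : i ≠ k)]
      rw [e1, e2]
    · cases i with
      | zero =>
        cases j with
        | zero => omega
        | succ m =>
          have hm : m < t.length := by simpa using hj
          have e : hSwap (a :: t) 0 (m + 1) = hGet t m :: t.set m a := by
            simp [hSwap, hGet, List.getD]
          rw [e]
          exact pull_perm t a m hm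
      | succ n =>
        cases j with
        | zero =>
          have hn : n < t.length := by simpa using hi
          have e : hSwap (a :: t) (n + 1) 0 = hGet t n :: t.set n a := by
            rw [hSwap, List.set_comm _ _ (by omega : (n + 1 : Nat) ≠ 0)]
            simp [hGet, List.getD]
          rw [e]
          exact pull_perm t a n hn
        | succ m =>
          have e : hSwap (a :: t) (n + 1) (m + 1) = a :: hSwap t n m := by
            simp [hSwap, hGet, List.getD]
          rw [e]
          exact (ih n m (by simpa using hi) (by simpa using hj)).cons a

theorem siftUpF_perm (fuel : Nat) : ∀ (h : List Int) (pos : Nat), pos < h.length →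
    (siftUpF fuel h pos).Perm h := by
  induction fuel with
  | zero => intro h pos _; exact List.Perm.refl _
  | succ fuel ih =>
    intro h pos hp
    rw [siftUpF]
    dsimp only
    split
    · exact List.Perm.refl _
    · next hp0 =>
      split
      · have hpar : (pos - 1) / 2 < pos := by
          have := Nat.div_le_self (pos - 1) 2; omega
        refine (ih _ _ ?_).trans (hSwap_perm h pos ((pos - 1) / 2) hp (by omega))
        rw [hSwap_length]; omega
      · exact List.Perm.refl _

theorem siftDownF_perm (fuel : Nat) : ∀ (h : List Int) (pos : Nat),
    (siftDownF fuel h pos).Perm h := by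
  induction fuel with
  | zero => intro h pos; exact List.Perm.refl _
  | succ fuel ih =>
    intro h pos
    rw [siftDownF]
    dsimp only
    split
    · next hl =>
      split
      · next hcond =>
        simp only [Bool.and_eq_true, decide_eq_true_eq] at hcond
        split
        · exact (ih _ _).trans (hSwap_perm h pos (2 * pos + 2) (by omega) hcond.1)
        · exact List.Perm.refl _
      · split
        · exact (ih _ _).trans (hSwap_perm h pos (2 * pos + 1) (by omega) hl)
        · exact List.Perm.refl _
    · exact List.Perm.refl _

theorem heappush_perm (h : List Int) (x : Int) : (heappush h x).Perm (x :: h) := by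
  unfold heappush siftUp
  have h1 : h.length < (h ++ [x]).length := by simp
  exact (siftUpF_perm h.length (h ++ [x]) h.length h1).trans (List.perm_append_singleton x h)

theorem heappop_perm (h : List Int) (hne : h ≠ []) :
    ((heappop h).1 :: (heappop h).2).Perm h := by
  unfold heappop
  have hsplit : h.dropLast ++ [h.getLast?.getD 0] = h := by
    rcases List.eq_nil_or_concat h with rfl | ⟨t, a, rfl⟩
    · exact absurd rfl hne
    · simp
  by_cases hd : h.dropLast.isEmpty
  · have hz : h.dropLast = [] := by simpa [List.isEmpty_iff] using hd
    simp only [hd, if_pos]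
    conv_rhs => rw [← hsplit, hz]
    simp
  · have hdne : h.dropLast ≠ [] := by simpa [List.isEmpty_iff] using hd
    simp only [hd, Bool.false_eq_true, not_false_iff, if_neg]
    rcases List.exists_cons_of_ne_nil hdne with ⟨b, t, hbt⟩
    have h0 : hGet h.dropLast 0 = b := by rw [hbt]; rfl
    have hset : h.dropLast.set 0 (h.getLast?.getD 0) = h.getLast?.getD 0 :: t := by
      rw [hbt]; rfl
    refine (List.Perm.cons _ (siftDownF_perm _ _ 0)).trans ?_
    rw [h0, hset]
    refine (List.Perm.swap (h.getLast?.getD 0) b t).trans ?_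
    conv_rhs => rw [← hsplit, hbt]
    exact (List.perm_append_singleton _ _).symm

-- the heap invariant
def IsHeap (h : List Int) : Prop :=
  ∀ j, 0 < j → j < h.length → hGet h ((j - 1) / 2) ≤ hGet h j

theorem heap_min (h : List Int) (hh : IsHeap h) :
    ∀ j, j < h.length → hGet h 0 ≤ hGet h j := by
  intro j
  induction j using Nat.strong_induction_on with
  | _ j ih =>
    intro hj
    rcases Nat.eq_zero_or_pos j with rfl | hj0
    · exact le_refl _
    · have hpar : (j - 1) / 2 < j := by
        have := Nat.div_le_self (j - 1) 2; omega
      exact (ih _ hpar (hpar.trans hj)).trans (hh j hj0 hj)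

theorem siftUpF_heap (fuel : Nat) : ∀ (h : List Int) (pos : Nat), pos ≤ fuel →
    pos < h.length →
    (∀ j, 0 < j → j < h.length → j ≠ pos → hGet h ((j - 1) / 2) ≤ hGet h j) →
    (∀ j, 0 < j → j < h.length → (j - 1) / 2 = pos → 0 < pos →
      hGet h ((pos - 1) / 2) ≤ hGet h j) →
    IsHeap (siftUpF fuel h pos) := by
  induction fuel with
  | zero =>
    intro h pos hfuel _ inv1 _
    have hpos : pos = 0 := by omega
    intro j hj0 hjl
    exact inv1 j hj0 hjl (by omega)
  | succ fuel ih =>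
    intro h pos hfuel hp inv1 inv2
    rw [siftUpF]
    dsimp only
    split
    · next hp0 =>
      intro j hj0 hjl
      exact inv1 j hj0 hjl (by omega)
    · next hp0 =>
      split
      · next hlt =>
        set parent := (pos - 1) / 2 with hpdef
        have hpos0 : 0 < pos := Nat.pos_of_ne_zero hp0
        have hparlt : parent < pos := by
          rw [hpdef]; have := Nat.div_le_self (pos - 1) 2; omega
        have hparl : parent < h.length := hparlt.trans hp
        apply ih
        · omega
        · rw [hSwap_length]; exact hparl
        · -- inv1 for hSwap h pos parent at parent
          intro j hj0 hjl hjp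
          rw [hSwap_length] at hjl
          by_cases hjpos : j = pos
          · subst hjpos
            rw [← hpdef, hGet_swap_snd _ _ _ hparl, hGet_swap_fst _ _ _ hp]
            exact le_of_lt hlt
          · have hval : hGet (hSwap h pos parent) j = hGet h j :=
              hGet_swap_other _ _ _ _ hjpos hjp
            by_cases hc : (j - 1) / 2 = pos
            · rw [hc, hGet_swap_fst _ _ _ hp, hval]
              exact inv2 j hj0 hjl hc hpos0
            · by_cases hc2 : (j - 1) / 2 = parent
              · rw [hc2, hGet_swap_snd _ _ _ hparl, hval]
                refine le_trans (le_of_lt hlt) ?_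
                have h1 := inv1 j hj0 hjl hjpos
                rwa [hc2] at h1
              · rw [hGet_swap_other _ _ _ _ hc hc2, hval]
                exact inv1 j hj0 hjl hjpos
        · -- inv2 for hSwap h pos parent at parent
          intro j hj0 hjl hjc hpar0
          rw [hSwap_length] at hjl
          have hgp : (parent - 1) / 2 < parent := by
            have := Nat.div_le_self (parent - 1) 2; omega
          rw [hGet_swap_other _ _ _ _ (by omega : (parent - 1) / 2 ≠ pos)
            (by omega : (parent - 1) / 2 ≠ parent)]
          have hjnepar : j ≠ parent := by
            have h1 : parent ≤ (j - 1) / 2 := le_of_eq hjc.symm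
            have h2 := Nat.div_le_self (j - 1) 2
            omega
          by_cases hjpos : j = pos
          · subst hjpos
            rw [hGet_swap_fst _ _ _ hp]
            exact inv1 parent hpar0 hparl (by omega)
          · rw [hGet_swap_other _ _ _ _ hjpos hjnepar]
            have h1 := inv1 j hj0 hjl hjpos
            rw [hjc] at h1
            exact le_trans (inv1 parent hpar0 hparl (by omega)) h1
      · next hlt =>
        intro j hj0 hjl
        by_cases hjpos : j = pos
        · subst hjpos
          exact not_lt.mp hlt
        · exact inv1 j hj0 hjl hjpos

theorem heappush_heap (h : List Int) (x : Int) (hh : IsHeap h) : IsHeap (heappush h x) := by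
  unfold heappush siftUp
  apply siftUpF_heap _ _ _ (by simp) (by simp)
  · intro j hj0 hjl hjn
    have hjlt : j < h.length := by simp at hjl; omega
    have hparlt : (j - 1) / 2 < h.length := by
      have := Nat.div_le_self (j - 1) 2; omega
    have e1 : hGet (h ++ [x]) j = hGet h j := by
      simp [hGet, List.getD, List.getElem?_append_left hjlt]
    have e2 : hGet (h ++ [x]) ((j - 1) / 2) = hGet h ((j - 1) / 2) := by
      simp [hGet, List.getD, List.getElem?_append_left hparlt]
    rw [e1, e2]; exact hh j hj0 hjlt
  · intro j hj0 hjl hjc _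
    -- a child of the last index would lie beyond the list: vacuous
    exfalso
    have h2 : 2 * h.length + 1 ≤ j := by omega
    simp at hjl; omega

-- invariant transfer for one sift-down swap step
theorem down_swap_inv (h : List Int) (pos c : Nat)
    (hcl : c < h.length) (hcgt : pos < c) (hcpar : (c - 1) / 2 = pos)
    (hcmin : ∀ j, 0 < j → j < h.length → (j - 1) / 2 = pos → hGet h c ≤ hGet h j)
    (hlt : hGet h c < hGet h pos)
    (inv1 : ∀ j, 0 < j → j < h.length → (j - 1) / 2 ≠ pos → hGet h ((j - 1) / 2) ≤ hGet h j)
    (inv2 : ∀ j, 0 < j → j < h.length → (j - 1) / 2 = pos → 0 < pos →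
      hGet h ((pos - 1) / 2) ≤ hGet h j) :
    (∀ j, 0 < j → j < (hSwap h pos c).length → (j - 1) / 2 ≠ c →
      hGet (hSwap h pos c) ((j - 1) / 2) ≤ hGet (hSwap h pos c) j) ∧
    (∀ j, 0 < j → j < (hSwap h pos c).length → (j - 1) / 2 = c → 0 < c →
      hGet (hSwap h pos c) ((c - 1) / 2) ≤ hGet (hSwap h pos c) j) := by
  have hpl : pos < h.length := lt_trans hcgt hcl
  constructor
  · intro j hj0 hjl hjc
    rw [hSwap_length] at hjl
    by_cases hjceq : j = c
    · subst hjceq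
      rw [hcpar, hGet_swap_fst _ _ _ hpl, hGet_swap_snd _ _ _ hcl]
      exact le_of_lt hlt
    · by_cases hjpos : j = pos
      · subst hjpos
        have hpp : (j - 1) / 2 < j := by
          have := Nat.div_le_self (j - 1) 2; omega
        rw [hGet_swap_other _ _ _ _ (by omega : (j - 1) / 2 ≠ j)
          (by omega : (j - 1) / 2 ≠ c), hGet_swap_fst _ _ _ hpl]
        exact inv2 c (by omega) hcl hcpar hj0
      · have hval : hGet (hSwap h pos c) j = hGet h j :=
          hGet_swap_other _ _ _ _ hjpos hjceq
        by_cases hjparpos : (j - 1) / 2 = pos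
        · rw [hjparpos, hGet_swap_fst _ _ _ hpl, hval]
          exact hcmin j hj0 hjl hjparpos
        · rw [hGet_swap_other _ _ _ _ hjparpos hjc, hval]
          exact inv1 j hj0 hjl hjparpos
  · intro j hj0 hjl hjc _
    rw [hSwap_length] at hjl
    rw [hcpar]
    have hjgt : c < j := by
      have h1 : c ≤ (j - 1) / 2 := le_of_eq hjc.symm
      have h2 := Nat.div_le_self (j - 1) 2
      omega
    rw [hGet_swap_fst _ _ _ hpl,
      hGet_swap_other _ _ _ _ (by omega : j ≠ pos) (by omega : j ≠ c)]
    have h1 := inv1 j hj0 hjl (by omega)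
    rwa [hjc] at h1

-- if the smaller child is not below the parent, the array is already a heap
theorem down_stop (h : List Int) (pos c : Nat)
    (hcmin : ∀ j, 0 < j → j < h.length → (j - 1) / 2 = pos → hGet h c ≤ hGet h j)
    (hnlt : ¬ hGet h c < hGet h pos)
    (inv1 : ∀ j, 0 < j → j < h.length → (j - 1) / 2 ≠ pos →
      hGet h ((j - 1) / 2) ≤ hGet h j) :
    IsHeap h := by
  intro j hj0 hjl
  by_cases hjp : (j - 1) / 2 = pos
  · rw [hjp]
    exact le_trans (not_lt.mp hnlt) (hcmin j hj0 hjl hjp)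
  · exact inv1 j hj0 hjl hjp

theorem siftDownF_heap (fuel : Nat) : ∀ (h : List Int) (pos : Nat),
    h.length ≤ fuel + pos →
    (∀ j, 0 < j → j < h.length → (j - 1) / 2 ≠ pos → hGet h ((j - 1) / 2) ≤ hGet h j) →
    (∀ j, 0 < j → j < h.length → (j - 1) / 2 = pos → 0 < pos →
      hGet h ((pos - 1) / 2) ≤ hGet h j) →
    IsHeap (siftDownF fuel h pos) := by
  induction fuel with
  | zero =>
    intro h pos hfuel inv1 _
    show IsHeap h
    intro j hj0 hjl
    apply inv1 j hj0 hjl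
    have h1 := Nat.div_le_self (j - 1) 2
    omega
  | succ fuel ih =>
    intro h pos hfuel inv1 inv2
    rw [siftDownF]
    dsimp only
    split
    · next hl =>
      split
      · next hcond =>
        -- c = r = 2*pos+2 (the right child exists and is the smaller one)
        simp only [Bool.and_eq_true, decide_eq_true_eq] at hcond
        obtain ⟨hrl, hrv⟩ := hcond
        have hcmin : ∀ j, 0 < j → j < h.length → (j - 1) / 2 = pos →
            hGet h (2 * pos + 2) ≤ hGet h j := by
          intro j hj0 hjl hjp
          have hjlr : j = 2 * pos + 1 ∨ j = 2 * pos + 2 := by omega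
          rcases hjlr with rfl | rfl
          · exact le_of_lt hrv
          · exact le_refl _
        split
        · next hlt =>
          obtain ⟨i1, i2⟩ := down_swap_inv h pos (2 * pos + 2) hrl (by omega)
            (by omega) hcmin hlt inv1 inv2
          apply ih _ _ _ i1 i2
          rw [hSwap_length]; omega
        · next hlt => exact down_stop h pos (2 * pos + 2) hcmin hlt inv1
      · next hcond =>
        -- c = l = 2*pos+1
        simp only [Bool.and_eq_true, decide_eq_true_eq, not_and, not_lt] at hcond
        have hcmin : ∀ j, 0 < j → j < h.length → (j - 1) / 2 = pos →
            hGet h (2 * pos + 1) ≤ hGet h j := by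
          intro j hj0 hjl hjp
          have hjlr : j = 2 * pos + 1 ∨ j = 2 * pos + 2 := by omega
          rcases hjlr with rfl | rfl
          · exact le_refl _
          · exact hcond hjl
        split
        · next hlt =>
          obtain ⟨i1, i2⟩ := down_swap_inv h pos (2 * pos + 1) hl (by omega)
            (by omega) hcmin hlt inv1 inv2
          apply ih _ _ _ i1 i2
          rw [hSwap_length]; omega
        · next hlt => exact down_stop h pos (2 * pos + 1) hcmin hlt inv1
    · next hl =>
      intro j hj0 hjl
      by_cases hjp : (j - 1) / 2 = pos
      · exfalso
        have h1 : pos ≤ (j - 1) / 2 := le_of_eq hjp.symm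
        have h2 : (j - 1) / 2 ≤ (j - 1) := Nat.div_le_self _ _
        omega
      · exact inv1 j hj0 hjl hjp

theorem heappop_min_heap (h : List Int) (hne : h ≠ []) (hh : IsHeap h) :
    (heappop h).1 = hGet h 0 ∧ IsHeap (heappop h).2 := by
  unfold heappop
  have hlen0 : h.length ≠ 0 := by simpa [List.length_eq_zero_iff] using hne
  by_cases hd : h.dropLast.isEmpty
  · have hz : h.dropLast = [] := by simpa [List.isEmpty_iff] using hd
    have hl1 : h.length = 1 := by
      have h2 := congrArg List.length hz
      simp only [List.length_dropLast, List.length_nil] at h2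
      omega
    rcases h with _ | ⟨a, t⟩
    · exact absurd rfl hne
    · have ht : t = [] := by
        simpa [List.length_eq_zero_iff] using hl1
      subst ht
      refine ⟨rfl, ?_⟩
      intro j hj0 hjl
      simp at hjl
  · have hdne : h.dropLast ≠ [] := by simpa [List.isEmpty_iff] using hd
    have hdl : h.dropLast.length < h.length := by
      rw [List.length_dropLast]; omega
    have hd0 : 0 < h.dropLast.length := by
      have := List.length_pos_iff.mpr hdne; omega
    have hget_dl : ∀ k, k < h.dropLast.length → hGet h.dropLast k = hGet h k := by
      intro k hkl
      rw [hGet_eq_getElem _ _ hkl, hGet_eq_getElem _ _ (hkl.trans hdl),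
        List.getElem_dropLast]
    simp only [hd, Bool.false_eq_true, not_false_iff, if_neg]
    constructor
    · exact hget_dl 0 hd0
    · unfold siftDown
      apply siftDownF_heap
    -- fuel (rest.set 0 last).length suffices for start position 0
      · rw [List.length_set]; omega
      · intro j hj0 hjl hjp
        rw [List.length_set] at hjl
        have hjp0 : 0 < (j - 1) / 2 := Nat.pos_of_ne_zero hjp
        have hjpl : (j - 1) / 2 < h.dropLast.length := by
          have h2 := Nat.div_le_self (j - 1) 2; omega
        rw [hGet_set_ne _ _ _ _ (by omega : (0 : Nat) ≠ (j - 1) / 2),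
          hGet_set_ne _ _ _ _ (by omega : (0 : Nat) ≠ j),
          hget_dl _ hjpl, hget_dl _ hjl]
        exact hh j hj0 (hjl.trans hdl)
      · intro j _ _ _ hpos0
        omega

theorem heap_min_mem (h : List Int) (hh : IsHeap h) :
    ∀ x ∈ h, hGet h 0 ≤ x := by
  intro x hx
  rcases List.mem_iff_getElem.mp hx with ⟨j, hj, rfl⟩
  rw [← hGet_eq_getElem _ _ hj]
  exact heap_min h hh j hj

theorem popAllF_spec (fuel : Nat) : ∀ h : List Int, h.length ≤ fuel → IsHeap h →
    (popAllF fuel h).Perm h ∧ (popAllF fuel h).Pairwise (· ≤ ·) := by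
  induction fuel with
  | zero =>
    intro h hfuel _
    have hz : h = [] := by
      rw [← List.length_eq_zero_iff]; omega
    subst hz
    exact ⟨List.Perm.refl _, List.Pairwise.nil⟩
  | succ fuel ih =>
    intro h hfuel hheap
    rw [popAllF]
    dsimp only
    split
    · next hh =>
      have hz : h = [] := by simpa [List.isEmpty_iff] using hh
      subst hz
      exact ⟨List.Perm.refl _, List.Pairwise.nil⟩
    · next hh =>
      have hne : h ≠ [] := by simpa [List.isEmpty_iff] using hh
      obtain ⟨hmin_eq, hheap'⟩ := heappop_min_heap h hne hheap
      have hperm := heappop_perm h hne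
      have hlen' : (heappop h).2.length ≤ fuel := by
        have h1 := heappop_length h hne
        have h2 : h.length ≠ 0 := by simpa [List.length_eq_zero_iff] using hne
        omega
      obtain ⟨ihp, ihs⟩ := ih (heappop h).2 hlen' hheap'
      refine ⟨(ihp.cons (heappop h).1).trans hperm, ?_⟩
      refine List.Pairwise.cons ?_ ihs
      intro x hx
      have hx2 : x ∈ (heappop h).2 := (ihp.mem_iff).mp hx
      have hxh : x ∈ h := hperm.subset (List.mem_cons_of_mem _ hx2)
      rw [hmin_eq]
      exact heap_min_mem h hheap x hxh

theorem popAll_spec (h : List Int) (hh : IsHeap h) :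
    (popAll h).Perm h ∧ (popAll h).Pairwise (· ≤ ·) :=
  popAllF_spec h.length h (le_refl _) hh

theorem foldl_push_perm (row : List Int) : ∀ q : List Int,
    (row.foldl (fun q x => heappush q x) q).Perm (q ++ row) := by
  induction row with
  | nil => intro q; simp
  | cons x row ih =>
    intro q
    refine (ih (heappush q x)).trans ?_
    have h1 : (heappush q x).Perm (q ++ [x]) :=
      (heappush_perm q x).trans (List.perm_append_singleton x q).symm
    have h2 := h1.append_right row
    simpa using h2

theorem foldl_rows_perm (param : List (List Int)) : ∀ q : List Int,
    (param.foldl (fun q row => row.foldl (fun q x => heappush q x) q) q).Perm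
      (q ++ param.flatMap (fun row => row)) := by
  induction param with
  | nil => intro q; simp
  | cons row param ih =>
    intro q
    refine (ih _).trans ?_
    have h1 := (foldl_push_perm row q).append_right (param.flatMap (fun row => row))
    simpa using h1

theorem build_perm (param : List (List Int)) :
    (param.foldl (fun q row => row.foldl (fun q x => heappush q x) q) []).Perm
      (param.flatMap (fun row => row)) := by
  simpa using foldl_rows_perm param []

theorem foldl_push_heap (row : List Int) : ∀ q : List Int, IsHeap q →
    IsHeap (row.foldl (fun q x => heappush q x) q) := by
  induction row with
  | nil => exact fun q hq => hq
  | cons x row ih => exact fun q hq => ih _ (heappush_heap q x hq)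

theorem build_heap (param : List (List Int)) :
    IsHeap (param.foldl (fun q row => row.foldl (fun q x => heappush q x) q) []) := by
  have hgen : ∀ q : List Int, IsHeap q →
      IsHeap (param.foldl (fun q row => row.foldl (fun q x => heappush q x) q) q) := by
    induction param with
    | nil => exact fun q hq => hq
    | cons row param ih => exact fun q hq => ih _ (foldl_push_heap row q hq)
  exact hgen [] (by intro j hj0 hjl; simp at hjl)

theorem solution_alt_eq (param : List (List Int)) :
    solution_alt param = solution param := by
  unfold solution solution_alt
  have hq := (popAll_spec _ (build_heap param))
  exact PySem.List.sorted_id_eq_of_perm_of_pairwise _ _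
    (hq.1.trans (build_perm param)) hq.2

-- ===== VERDICT (by name: the statement is the Claim_ definition above) =====
theorem solution_spec : Claim_equal_solution := by
  intro param _
  unfold Spec_solution
  exact (solution_alt_eq param).symm
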